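-- pv_equiv track=rewrite | github.com/iscc/twinspect | twinspect/render/plot.py | find_crossover
-- ===== SOURCE A (Python) =====
-- def find_crossover(intra, inter):
--     """Find approximate crossover point where inter-cluster frequency exceeds intra-cluster."""
--     if not intra or not inter:
--         return None
--     max_dist = max(max(intra.keys(), default=0), max(inter.keys(), default=0))
--     for d in range(max_dist + 1):
--         intra_freq = intra.get(d, 0)
--         inter_freq = inter.get(d, 0)
--         if inter_freq > intra_freq and intra_freq > 0:
--             return d
--     return None
-- ===== SOURCE B (Python) =====
-- def find_crossover(intra, inter):
--     """Find approximate crossover point where inter-cluster frequency exceeds intra-cluster."""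
--     for k in sorted(intra.keys()):
--         v = intra.get(k, 0)
--         if k >= 0 and v > 0 and inter.get(k, 0) > v:
--             return k
--     return None
-- ===== Notes on version B (the rewrite author's own statement) =====
-- stated objective: simpler
-- what changed: Instead of scanning every distance d in range(0, max_dist+1) with two dict lookups each, B iterates only the sorted keys of intra (a crossover must be a nonnegative intra key with positive count) and returns the first qualifying key, with no max computation or emptiness guards.
import Mathlib
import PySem

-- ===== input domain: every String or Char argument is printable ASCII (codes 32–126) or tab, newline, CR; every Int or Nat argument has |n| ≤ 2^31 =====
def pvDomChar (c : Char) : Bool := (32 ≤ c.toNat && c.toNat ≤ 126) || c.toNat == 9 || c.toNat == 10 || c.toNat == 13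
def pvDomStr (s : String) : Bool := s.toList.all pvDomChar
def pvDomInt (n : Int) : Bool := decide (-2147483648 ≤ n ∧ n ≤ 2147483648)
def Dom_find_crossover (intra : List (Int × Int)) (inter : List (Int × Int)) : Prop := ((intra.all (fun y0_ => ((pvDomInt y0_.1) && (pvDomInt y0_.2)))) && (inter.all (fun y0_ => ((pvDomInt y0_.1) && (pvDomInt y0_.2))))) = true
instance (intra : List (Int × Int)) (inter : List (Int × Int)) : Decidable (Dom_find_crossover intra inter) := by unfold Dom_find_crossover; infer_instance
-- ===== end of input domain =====

-- B replaces A's scan over every distance in range(0, max_dist+1) by a scan over the sorted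
-- intra keys only (a crossover point is necessarily a nonnegative intra key with positive count);
-- objective: simpler.

-- ===== PORT A =====
def find_crossover (intra : List (Int × Int)) (inter : List (Int × Int)) : Option Int :=
  if intra.isEmpty || inter.isEmpty then none
  else
    let dIntra := PySem.Dict.mk intra
    let dInter := PySem.Dict.mk inter
    let max_dist := max ((PySem.List.max? dIntra.keys (fun x => x)).getD 0)
                        ((PySem.List.max? dInter.keys (fun x => x)).getD 0)
    (PySem.List.pyRange 0 (max_dist + 1) 1).find? (fun d =>
      let intra_freq := dIntra.getD d 0
      let inter_freq := dInter.getD d 0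
      decide (inter_freq > intra_freq ∧ intra_freq > 0))

-- ===== PORT B =====
def find_crossover_alt (intra : List (Int × Int)) (inter : List (Int × Int)) : Option Int :=
  let dIntra := PySem.Dict.mk intra
  let dInter := PySem.Dict.mk inter
  (PySem.List.sorted dIntra.keys (fun x => x) false).find? (fun k =>
    let v := dIntra.getD k 0
    decide (0 ≤ k ∧ 0 < v ∧ dInter.getD k 0 > v))

-- ===== PRECONDITION & SPEC =====
def Spec_find_crossover (intra : List (Int × Int)) (inter : List (Int × Int)) (out : Option Int) : Prop := out = find_crossover_alt intra inter
instance (intra : List (Int × Int)) (inter : List (Int × Int)) (out : Option Int) : Decidable (Spec_find_crossover intra inter out) := by unfold Spec_find_crossover; infer_instance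

-- ===== CLAIM (what is proved, stated in full; the proofs are below) =====
def Claim_equal_find_crossover : Prop := ∀ (intra : List (Int × Int)) (inter : List (Int × Int)), Dom_find_crossover intra inter → Spec_find_crossover intra inter (find_crossover intra inter)

-- ===== LEMMAS AND PROOFS =====

-- A positive lookup means the key is present.
lemma mem_keys_of_getD_pos {l : List (Int × Int)} {k : Int}
    (h : 0 < (PySem.Dict.mk l).getD k 0) : k ∈ (PySem.Dict.mk l).keys := by
  by_cases hc : (PySem.Dict.mk l).contains k = true
  · exact (PySem.Dict.contains_iff_mem_keys _ _).mp hc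
  · have hcf : (PySem.Dict.mk l).contains k = false := by
      revert hc; cases (PySem.Dict.mk l).contains k <;> simp
    rw [PySem.Dict.getD_of_not_contains _ _ hcf] at h
    omega

-- On a ≤-sorted list, find? returns the least element satisfying the predicate (forward direction).
lemma find?_sorted_facts {L : List Int} {p : Int → Bool} {m : Int}
    (hs : L.Pairwise (· ≤ ·)) (h : L.find? p = some m) :
    m ∈ L ∧ p m = true ∧ ∀ x ∈ L, p x = true → m ≤ x := by
  induction L with
  | nil => simp at h
  | cons a t ih =>
    rcases List.pairwise_cons.mp hs with ⟨ha, ht⟩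
    by_cases hpa : p a = true
    · rw [List.find?_cons_of_pos hpa] at h
      obtain rfl : a = m := by injection h
      refine ⟨List.mem_cons_self, hpa, ?_⟩
      intro x hx _
      rcases List.mem_cons.mp hx with rfl | hx
      · exact le_refl _
      · exact ha x hx
    · rw [List.find?_cons_of_neg (by simpa using hpa)] at h
      obtain ⟨hm, hpm, hmin⟩ := ih ht h
      refine ⟨List.mem_cons_of_mem _ hm, hpm, ?_⟩
      intro x hx hpx
      rcases List.mem_cons.mp hx with rfl | hx
      · exact absurd hpx hpa
      · exact hmin x hx hpx
-- On a ≤-sorted list, the least element satisfying the predicate is what find? returns.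
lemma find?_sorted_of_min {L : List Int} {p : Int → Bool} {m : Int}
    (hs : L.Pairwise (· ≤ ·)) (hm : m ∈ L) (hpm : p m = true)
    (hmin : ∀ x ∈ L, p x = true → m ≤ x) : L.find? p = some m := by
  induction L with
  | nil => simp at hm
  | cons a t ih =>
    rcases List.pairwise_cons.mp hs with ⟨ha, ht⟩
    by_cases hpa : p a = true
    · rw [List.find?_cons_of_pos hpa]
      have h1 : m ≤ a := hmin a List.mem_cons_self hpa
      have h2 : a ≤ m := by
        rcases List.mem_cons.mp hm with rfl | hm
        · exact le_refl _
        · exact ha m hm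
      rw [le_antisymm h2 h1]
    · rw [List.find?_cons_of_neg (by simpa using hpa)]
      have hm' : m ∈ t := by
        rcases List.mem_cons.mp hm with rfl | hm
        · exact absurd hpm hpa
        · exact hm
      exact ih ht hm' (fun x hx hpx => hmin x (List.mem_cons_of_mem _ hx) hpx)

-- Every key of a nonempty dict is at most max(keys).getD 0 (with the identity key).
lemma mem_le_maxGetD {ks : List Int} {k : Int} (hk : k ∈ ks) :
    k ≤ (PySem.List.max? ks (fun x => x)).getD 0 := by
  cases hmax : PySem.List.max? ks (fun x => x) with
  | none =>
    rw [PySem.List.max?_eq_none_iff] at hmax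
    subst hmax; simp at hk
  | some m =>
    simpa using PySem.List.max?_isMax hmax k hk

theorem find_crossover_eq_alt (intra inter : List (Int × Int)) :
    find_crossover intra inter = find_crossover_alt intra inter := by
  by_cases hintra : intra = []
  · subst hintra
    have hsnil : PySem.List.sorted ([] : List Int) (fun x : Int => x) false = [] :=
      (PySem.List.sorted_perm ([] : List Int) (fun x : Int => x) false).eq_nil
    simp [find_crossover, find_crossover_alt, hsnil]
  · by_cases hinter : inter = []
    · subst hinter
      have hA : find_crossover intra [] = none := by
        simp [find_crossover]
      rw [hA, find_crossover_alt, eq_comm, List.find?_eq_none]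
      intro k _
      simp only [decide_eq_true_eq, not_and, not_lt]
      intro _ hv
      have : (PySem.Dict.mk ([] : List (Int × Int))).getD k 0 = 0 := by
        apply PySem.Dict.getD_of_not_contains
        simp [PySem.Dict.contains]
      omega
    · -- both nonempty
      have hguard : (intra.isEmpty || inter.isEmpty) = false := by
        simp [hintra, hinter]
      set dIntra := PySem.Dict.mk intra with hdIntra
      set dInter := PySem.Dict.mk inter with hdInter
      set M : Int := max ((PySem.List.max? dIntra.keys (fun x => x)).getD 0)
                        ((PySem.List.max? dInter.keys (fun x => x)).getD 0) with hM
      set pA : Int → Bool := fun d =>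
        decide (dInter.getD d 0 > dIntra.getD d 0 ∧ dIntra.getD d 0 > 0) with hpA
      set pB : Int → Bool := fun k =>
        decide (0 ≤ k ∧ 0 < dIntra.getD k 0 ∧ dInter.getD k 0 > dIntra.getD k 0) with hpB
      have hA : find_crossover intra inter = (PySem.List.pyRange 0 (M + 1) 1).find? pA := by
        rw [find_crossover, hguard]; rfl
      have hB : find_crossover_alt intra inter
          = (PySem.List.sorted dIntra.keys (fun x => x) false).find? pB := rfl
      -- pB implies membership in A's range
      have hrange : ∀ k : Int, k ∈ PySem.List.sorted dIntra.keys (fun x => x) false →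
          pB k = true → k ∈ PySem.List.pyRange 0 (M + 1) 1 ∧ pA k = true := by
        intro k hk hpk
        rw [hpB] at hpk
        simp only [decide_eq_true_eq] at hpk
        obtain ⟨h0, hv, hgt⟩ := hpk
        have hkeys : k ∈ dIntra.keys := (PySem.List.mem_sorted _ _ _ _).mp hk
        have hle : k ≤ M := le_trans (mem_le_maxGetD hkeys) (le_max_left _ _)
        refine ⟨PySem.List.mem_pyRange_one.mpr ⟨h0, by omega⟩, ?_⟩
        rw [hpA]; simp only [decide_eq_true_eq]; exact ⟨hgt, hv⟩
      rw [hA, hB]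
      cases hfind : (PySem.List.pyRange 0 (M + 1) 1).find? pA with
      | none =>
        rw [eq_comm, List.find?_eq_none]
        intro k hk hpk
        obtain ⟨hmem, hpa⟩ := hrange k hk hpk
        exact (List.find?_eq_none.mp hfind k hmem) hpa
      | some m =>
        rw [eq_comm]
        have hsortedA : (PySem.List.pyRange 0 (M + 1) 1).Pairwise (· ≤ ·) :=
          (PySem.List.pairwise_lt_pyRange_one 0 (M + 1)).imp le_of_lt
        obtain ⟨hmemA, hpm, hminA⟩ := find?_sorted_facts hsortedA hfind
        apply find?_sorted_of_min (PySem.List.sorted_pairwise dIntra.keys (fun x => x))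
        · -- m is a key of intra
          rw [PySem.List.mem_sorted]
          rw [hpA] at hpm; simp only [decide_eq_true_eq] at hpm
          exact mem_keys_of_getD_pos hpm.2
        · -- pB m
          have h0 : 0 ≤ m := (PySem.List.mem_pyRange_one.mp hmemA).1
          rw [hpA] at hpm; simp only [decide_eq_true_eq] at hpm
          rw [hpB]; simp only [decide_eq_true_eq]
          exact ⟨h0, hpm.2, hpm.1⟩
        · -- minimality
          intro x hx hpx
          obtain ⟨hmem, hpa⟩ := hrange x hx hpx
          exact hminA x hmem hpa

-- ===== VERDICT (by name: the statement is the Claim_ definition above) =====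
theorem find_crossover_spec : Claim_equal_find_crossover := by
  intro intra inter _
  exact find_crossover_eq_alt intra inter
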